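-- pv_equiv track=rewrite | github.com/abulavin/ptracking | ptracking/sentiment/corenlp.py | add_whitespace_after_fullstop
-- ===== SOURCE A (Python) =====
-- def add_whitespace_after_fullstop(text):
--     text = text.strip().split(" ")
--     new_text = []
--     for word in text:
--         if "." in word:
--             before, dot, after = word.partition(".")
--             if after and before.isalpha() and after[0].isalpha():
--                 word = before + dot + " " + after
--         new_text.append(word)
--
--     return " ".join(new_text)
-- ===== SOURCE B (Python) =====
-- def add_whitespace_after_fullstop(text):
--     # single left-to-right character scan with a small state machine (no split/join of words)
--     out = []
--     empty = True      # current token's pre-dot prefix is empty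
--     allalpha = True   # every pre-dot char of current token is alphabetic
--     dotted = False    # current token already contained a '.'
--     pending = False   # previous char was the token's first '.' with a nonempty all-alpha prefix
--     for c in text.strip():
--         if pending and c.isalpha():
--             out.append(' ')
--         pending = False
--         out.append(c)
--         if c == ' ':
--             empty, allalpha, dotted = True, True, False
--         elif c == '.' and not dotted:
--             pending = (not empty) and allalpha
--             dotted = True
--         elif not dotted:
--             empty = False
--             allalpha = allalpha and c.isalpha()
--     return ''.join(out)
-- ===== Notes on version B (the rewrite author's own statement) =====
-- stated objective: alternative
-- what changed: Replaces A's strip/split-into-words/per-word partition loop/join pipeline by a single left-to-right character scan over the stripped string that threads four boolean flags (empty prefix, all-alphabetic prefix, dot seen, space pending) and emits the output in one pass.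
import Mathlib
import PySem

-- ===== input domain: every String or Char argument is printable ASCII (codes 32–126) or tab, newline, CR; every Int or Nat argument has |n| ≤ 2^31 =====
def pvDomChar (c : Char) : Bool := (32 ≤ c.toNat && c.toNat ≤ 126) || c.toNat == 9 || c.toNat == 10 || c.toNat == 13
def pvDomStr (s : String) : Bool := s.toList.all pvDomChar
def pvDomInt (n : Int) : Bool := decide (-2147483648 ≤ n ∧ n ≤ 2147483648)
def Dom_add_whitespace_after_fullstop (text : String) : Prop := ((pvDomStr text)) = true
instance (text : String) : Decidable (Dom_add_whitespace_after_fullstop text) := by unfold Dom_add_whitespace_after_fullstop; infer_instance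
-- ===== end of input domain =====

-- B replaces A's split-into-words loop by a single left-to-right character scan with a
-- four-flag state machine (objective: alternative — same O(n) cost, different traversal).


-- ===== PORT A =====
-- body of A's loop for a word containing "." :  before, dot, after = word.partition(".")
-- (takeWhile/dropWhile is str.partition('.') exactly when '.' is in the word, which the caller checked)
def awfWord (word : List Char) : List Char :=
  let before := word.takeWhile (fun c => c ≠ '.')
  let after := (word.dropWhile (fun c => c ≠ '.')).drop 1
  if (!after.isEmpty && PySem.Chars.strIsalpha before &&
      (match after with | c :: _ => PySem.Chars.isalpha c | [] => false)) then
    before ++ ['.'] ++ [' '] ++ after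
  else word

def add_whitespace_after_fullstop (text : String) : String :=
  let stripped := PySem.Chars.strip text.toList          -- text.strip()
  let words := PySem.Chars.splitOn stripped [' ']        -- .split(" ")
  let new_text := words.foldl
    (fun acc word =>
      acc ++ [if PySem.Chars.isIn ['.'] word then awfWord word else word])
    ([] : List (List Char))
  String.ofList (PySem.Chars.join [' '] new_text)            -- " ".join(new_text)

-- ===== PORT B =====
-- state flags: empty (pre-dot prefix of current token empty), allalpha (pre-dot prefix all
-- alphabetic), dotted (token already had a '.'), pending (previous char was the token's first
-- '.' with a nonempty all-alpha prefix)
def altGo : List Char → Bool → Bool → Bool → Bool → List Char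
  | [], _, _, _, _ => []
  | c :: rest, empty, allalpha, dotted, pending =>
    (if pending && PySem.Chars.isalpha c then [' ', c] else [c]) ++
    (if c = ' ' then altGo rest true true false false
     else if c = '.' && !dotted then altGo rest empty allalpha true (!empty && allalpha)
     else if !dotted then altGo rest false (allalpha && PySem.Chars.isalpha c) dotted false
     else altGo rest empty allalpha dotted false)

def add_whitespace_after_fullstop_alt (text : String) : String :=
  String.ofList (altGo (PySem.Chars.strip text.toList) true true false false)

-- ===== PRECONDITION & SPEC =====
def Spec_add_whitespace_after_fullstop (text : String) (out : String) : Prop := out = add_whitespace_after_fullstop_alt text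
instance (text : String) (out : String) : Decidable (Spec_add_whitespace_after_fullstop text out) := by unfold Spec_add_whitespace_after_fullstop; infer_instance

-- ===== CLAIM (what is proved, stated in full; the proofs are below) =====
def Claim_equal_add_whitespace_after_fullstop : Prop := ∀ (text : String), Dom_add_whitespace_after_fullstop text → Spec_add_whitespace_after_fullstop text (add_whitespace_after_fullstop text)

-- ===== LEMMAS AND PROOFS =====

-- structural version of split(" ") : current token `cur`, remaining input
def sgo (cur : List Char) : List Char → List (List Char)
  | [] => [cur]
  | c :: r => if c = ' ' then cur :: sgo [] r else sgo (cur ++ [c]) r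

theorem splitOn_go_sp : ∀ (fuel : Nat) (l cur : List Char) (acc : List (List Char)) (_ : l.length < fuel),
    PySem.Chars.splitOn.go [' '] fuel l cur acc = acc.reverse ++ sgo cur.reverse l := by
  intro fuel
  induction fuel with
  | zero => intro l cur acc h; omega
  | succ f ih =>
    intro l cur acc h
    match l with
    | [] => simp [PySem.Chars.splitOn.go, sgo]
    | c :: rest =>
      rw [PySem.Chars.splitOn.go]
      by_cases hc : c = ' '
      · subst hc
        have hp : [' '].isPrefixOf (' ' :: rest) = true := by simp [List.isPrefixOf]
        rw [if_pos hp]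
        simp only [List.length_singleton, List.drop_succ_cons, List.drop_zero]
        rw [ih rest [] (cur.reverse :: acc) (by simpa using Nat.lt_of_succ_lt_succ h)]
        simp [sgo]
      · have hp : [' '].isPrefixOf (c :: rest) = false := by
          simp [List.isPrefixOf]
          exact fun h' => hc h'.symm
        rw [if_neg (by simp [hp])]
        rw [ih rest (c :: cur) acc (by simpa using Nat.lt_of_succ_lt_succ h)]
        simp [sgo, hc]

theorem splitOn_sp (l : List Char) : PySem.Chars.splitOn l [' '] = sgo [] l := by
  rw [PySem.Chars.splitOn, splitOn_go_sp (l.length + 1) l [] [] (by omega)]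
  rfl

-- A's per-word transformation
def fA (w : List Char) : List Char := if PySem.Chars.isIn ['.'] w then awfWord w else w

-- the scan threads its four flags through one char at a time; scanning an append decomposes
def stepState (s : Bool × Bool × Bool × Bool) (c : Char) : Bool × Bool × Bool × Bool :=
  if c = ' ' then (true, true, false, false)
  else if c = '.' && !s.2.2.1 then (s.1, s.2.1, true, !s.1 && s.2.1)
  else if !s.2.2.1 then (false, s.2.1 && PySem.Chars.isalpha c, s.2.2.1, false)
  else (s.1, s.2.1, s.2.2.1, false)

theorem altGo_append (xs ys : List Char) (e a d p : Bool) :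
    altGo (xs ++ ys) e a d p =
      altGo xs e a d p ++
        (let s := xs.foldl stepState (e, a, d, p); altGo ys s.1 s.2.1 s.2.2.1 s.2.2.2) := by
  induction xs generalizing e a d p with
  | nil => simp [altGo]
  | cons c xs ih =>
    simp only [List.cons_append, altGo, List.foldl_cons]
    by_cases h1 : c = ' '
    · simp [h1, stepState, ih, List.append_assoc]
    · by_cases h2 : (decide (c = '.') && !d) = true
      · have hcd : (decide (c = '.') && !d) = true := h2
        simp [h1, hcd, stepState, ih, List.append_assoc]
      · by_cases h3 : d = false
        · subst h3
          have hcd : ¬ c = '.' := by simpa using h2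
          simp [h1, hcd, stepState, ih, List.append_assoc]
        · rw [Bool.not_eq_false] at h3; subst h3
          simp [h1, stepState, ih, List.append_assoc]

-- chars of a space-free, dot-free run pass through unchanged (dotted = pending = false)
theorem altGo_nodot (t : List Char) (hsp : ' ' ∉ t) (hdot : '.' ∉ t) (e a : Bool) :
    altGo t e a false false = t := by
  induction t generalizing e a with
  | nil => simp [altGo]
  | cons c r ih =>
    have hc1 : c ≠ ' ' := fun h => hsp (h ▸ List.mem_cons_self)
    have hc2 : c ≠ '.' := fun h => hdot (h ▸ List.mem_cons_self)
    simp [altGo, hc1, hc2, ih (fun h => hsp (List.mem_cons_of_mem _ h))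
      (fun h => hdot (List.mem_cons_of_mem _ h))]

-- after the decision is settled (dotted, not pending) the rest of a token passes through
theorem altGo_dotted_nopending (t : List Char) (hsp : ' ' ∉ t) (e a : Bool) :
    altGo t e a true false = t := by
  induction t generalizing e a with
  | nil => simp [altGo]
  | cons c r ih =>
    have hc1 : c ≠ ' ' := fun h => hsp (h ▸ List.mem_cons_self)
    simp [altGo, hc1, ih (fun h => hsp (List.mem_cons_of_mem _ h))]

-- right after the first '.' of a token: a space goes in iff pending and the next char is alphabetic
theorem altGo_dotted (t : List Char) (hsp : ' ' ∉ t) (e a p : Bool) :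
    altGo t e a true p =
      if (p && PySem.Chars.isalpha (t.headD ' ')) = true then ' ' :: t else t := by
  cases t with
  | nil => simp [altGo, show PySem.Chars.isalpha ' ' = false by decide]
  | cons c r =>
    have hc1 : c ≠ ' ' := fun h => hsp (h ▸ List.mem_cons_self)
    have hr : ' ' ∉ r := fun h => hsp (List.mem_cons_of_mem _ h)
    by_cases hp : (p && PySem.Chars.isalpha c) = true <;>
      simp [altGo, hc1, hp, altGo_dotted_nopending r hr]

-- the state accumulated over a space-free, dot-free prefix b
theorem stepState_nodot (b : List Char) (hsp : ' ' ∉ b) (hdot : '.' ∉ b) (e a : Bool) :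
    b.foldl stepState (e, a, false, false) = (e && b.isEmpty, a && b.all PySem.Chars.isalpha, false, false) := by
  induction b generalizing e a with
  | nil => simp
  | cons c r ih =>
    have hc1 : c ≠ ' ' := fun h => hsp (h ▸ List.mem_cons_self)
    have hc2 : c ≠ '.' := fun h => hdot (h ▸ List.mem_cons_self)
    rw [List.foldl_cons, show stepState (e, a, false, false) c = (false, a && PySem.Chars.isalpha c, false, false) by
      simp [stepState, hc1, hc2]]
    rw [ih (fun h => hsp (List.mem_cons_of_mem _ h)) (fun h => hdot (List.mem_cons_of_mem _ h))]
    simp [Bool.and_assoc]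

-- decomposition of a word containing '.' at its first dot
theorem dot_decomp (t : List Char) (h : '.' ∈ t) :
    ∃ b aft, t = b ++ '.' :: aft ∧ t.takeWhile (fun c => c ≠ '.') = b ∧
      (t.dropWhile (fun c => c ≠ '.')).drop 1 = aft ∧ '.' ∉ b := by
  induction t with
  | nil => cases h
  | cons c r ih =>
    by_cases hc : c = '.'
    · exact ⟨[], r, by simp [hc], by simp [hc], by simp [hc], by simp⟩
    · have hr : '.' ∈ r := by cases List.mem_cons.mp h with
        | inl h' => exact absurd h'.symm hc
        | inr h' => exact h'
      obtain ⟨b, aft, h1, h2, h3, h4⟩ := ih hr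
      have h2' : List.takeWhile (fun c => !decide (c = '.')) r = b := by simpa using h2
      exact ⟨c :: b, aft, by simp [h1], by simp [hc, h2'], by simpa [hc] using h3,
        by simp [h4]; exact fun h' => hc h'.symm⟩

theorem isIn_dot (t : List Char) : PySem.Chars.isIn ['.'] t = true ↔ '.' ∈ t := by
  rw [PySem.Chars.isIn_iff_infix]
  constructor
  · rintro ⟨u, v, rfl⟩; simp
  · intro h
    obtain ⟨u, v, rfl⟩ := List.append_of_mem h
    exact ⟨u, v, by simp⟩

theorem altGo_token (t : List Char) (h : ' ' ∉ t) :
    altGo t true true false false = fA t := by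
  by_cases hdot : '.' ∈ t
  · obtain ⟨b, aft, ht, htw, hdw, hnb⟩ := dot_decomp t hdot
    subst ht
    have hspb : ' ' ∉ b := fun hm => h (List.mem_append_left _ hm)
    have hspa : ' ' ∉ aft := fun hm => h (List.mem_append_right _ (List.mem_cons_of_mem _ hm))
    rw [altGo_append]
    simp only [stepState_nodot b hspb hnb, altGo_nodot b hspb hnb]
    rw [show ∀ e a : Bool, altGo ('.' :: aft) e a false false =
          '.' :: altGo aft e a true (!e && a) from fun e a => by simp [altGo]]
    rw [altGo_dotted aft hspa]
    have hfA : fA (b ++ '.' :: aft) =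
        if (!aft.isEmpty && PySem.Chars.strIsalpha b && PySem.Chars.isalpha (aft.headD ' ')) = true
        then b ++ ['.'] ++ [' '] ++ aft else b ++ '.' :: aft := by
      unfold fA awfWord
      rw [if_pos ((isIn_dot _).mpr hdot)]
      simp only [htw, hdw]
      cases aft <;> simp [show PySem.Chars.isalpha ' ' = false by decide]
    rw [hfA, PySem.Chars.strIsalpha]
    cases aft with
    | nil => simp [show PySem.Chars.isalpha ' ' = false by decide]
    | cons c cs =>
      cases hE : b.isEmpty <;> cases hA2 : b.all PySem.Chars.isalpha <;>
        cases hAl : PySem.Chars.isalpha c <;> simp [hAl]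
  · unfold fA
    rw [if_neg (by simp [isIn_dot, hdot])]
    exact altGo_nodot t h hdot true true

theorem sgo_nospace (t : List Char) (h : ' ' ∉ t) : ∀ cur, sgo cur t = [cur ++ t] := by
  induction t with
  | nil => intro cur; simp [sgo]
  | cons c r ih =>
    intro cur
    have hc : c ≠ ' ' := fun h' => h (h' ▸ List.mem_cons_self)
    simp [sgo, hc, ih (fun h' => h (List.mem_cons_of_mem _ h'))]

theorem sgo_split (t r : List Char) (h : ' ' ∉ t) : ∀ cur,
    sgo cur (t ++ ' ' :: r) = (cur ++ t) :: sgo [] r := by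
  induction t with
  | nil => intro cur; simp [sgo]
  | cons c t' ih =>
    intro cur
    have hc : c ≠ ' ' := fun h' => h (h' ▸ List.mem_cons_self)
    simp [sgo, hc, ih (fun h' => h (List.mem_cons_of_mem _ h'))]

theorem sgo_ne_nil (cur l : List Char) : sgo cur l ≠ [] := by
  induction l generalizing cur with
  | nil => simp [sgo]
  | cons c r ih => by_cases hc : c = ' ' <;> simp [sgo, hc, ih]

-- a space resets the scan regardless of the incoming state
theorem altGo_space (r : List Char) (e a d p : Bool) :
    altGo (' ' :: r) e a d p = ' ' :: altGo r true true false false := by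
  have : PySem.Chars.isalpha ' ' = false := by decide
  simp [altGo, this]

theorem dropWhile_head_false {p : Char → Bool} : ∀ (l : List Char) (c : Char) (r : List Char),
    List.dropWhile p l = c :: r → p c = false := by
  intro l
  induction l with
  | nil => intro c r h; simp [List.dropWhile] at h
  | cons x xs ih =>
    intro c r h
    by_cases hx : p x = true
    · rw [List.dropWhile_cons_of_pos hx] at h; exact ih _ _ h
    · rw [List.dropWhile_cons_of_neg hx] at h
      cases h; simpa using hx

theorem main_aux : ∀ (n : Nat) (l : List Char), l.length ≤ n →
    PySem.Chars.join [' '] ((sgo [] l).map fA) = altGo l true true false false := by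
  intro n
  induction n with
  | zero =>
    intro l hl
    rw [List.length_eq_zero_iff.mp (Nat.le_zero.mp hl)]
    decide
  | succ n ih =>
    intro l hl
    have hts : l = l.takeWhile (fun c => c ≠ ' ') ++ l.dropWhile (fun c => c ≠ ' ') :=
      (List.takeWhile_append_dropWhile).symm
    have hsp : ' ' ∉ l.takeWhile (fun c => c ≠ ' ') := by
      intro hm
      have := List.mem_takeWhile_imp hm
      simp at this
    cases hdw : l.dropWhile (fun c => c ≠ ' ') with
    | nil =>
      have hl' : ' ' ∉ l := by
        rw [hts, hdw, List.append_nil]; exact hsp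
      rw [sgo_nospace l hl' [], List.nil_append, List.map_singleton,
        PySem.Chars.join_singleton, altGo_token l hl']
    | cons c r =>
      have hc : c = ' ' := by
        have := dropWhile_head_false l c r hdw
        simpa using this
      subst hc
      conv_lhs => rw [hts, hdw]
      conv_rhs => rw [hts, hdw]
      rw [sgo_split _ r hsp [], List.nil_append, List.map_cons]
      obtain ⟨x, M, hM⟩ : ∃ x M, (sgo [] r).map fA = x :: M := by
        cases hsg : (sgo [] r).map fA with
        | nil => exact absurd (List.map_eq_nil_iff.mp hsg) (sgo_ne_nil [] r)
        | cons x M => exact ⟨x, M, rfl⟩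
      have hlen : r.length ≤ n := by
        have := congrArg List.length hts
        rw [hdw] at this
        simp at this
        omega
      rw [hM, PySem.Chars.join_cons_cons, ← hM, ih r hlen,
        altGo_append, altGo_token _ hsp, altGo_space]
      simp

theorem main_lemma : ∀ (l : List Char),
    PySem.Chars.join [' '] ((sgo [] l).map fA) = altGo l true true false false :=
  fun l => main_aux l.length l (Nat.le_refl _)

-- ===== VERDICT (by name: the statement is the Claim_ definition above) =====
theorem add_whitespace_after_fullstop_spec : Claim_equal_add_whitespace_after_fullstop := by
  intro text _
  unfold Spec_add_whitespace_after_fullstop add_whitespace_after_fullstop add_whitespace_after_fullstop_alt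
  simp only [PySem.List.foldl_append_singleton_eq_map, splitOn_sp, List.nil_append]
  have h := main_lemma (PySem.Chars.strip text.toList)
  rw [show (fun x => if PySem.Chars.isIn ['.'] x = true then awfWord x else x) = fA from rfl, h]
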